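-- pv_equiv track=rewrite | github.com/HasanBradfordUni/myPublicFiles | Portfolio/Python Apps/Football chess/Football_chess V12.py | RB_moves
-- ===== SOURCE A (Python) =====
-- def RB_moves(moveFromX, moveFromY, moveToX, moveToY, size, player1Turn, player2Turn):
--     possibleMoves = []
--
--     moveDif = ((moveToX - moveFromX),(moveToY - moveFromY))
--
--     if player2Turn:
--         possibleMoves.append((-1,1))
--     elif player1Turn:
--         possibleMoves.append((1,1))
--
--     for x in range(size):
--         for y in range(size):
--             if x == y:
--                 if player2Turn:
--                     possibleMoves.append((x,-y))
--                     possibleMoves.append((x,y))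
--                 elif player1Turn:
--                     possibleMoves.append((-x,-y))
--                     possibleMoves.append((-x,y))
--
--     if moveDif in possibleMoves:
--         return True
--     else:
--         return False
-- ===== SOURCE B (Python) =====
-- def RB_moves(moveFromX, moveFromY, moveToX, moveToY, size, player1Turn, player2Turn):
--     dx = moveToX - moveFromX
--     dy = moveToY - moveFromY
--     if player2Turn:
--         return (dx == -1 and dy == 1) or (0 <= dx < size and abs(dy) == dx)
--     if player1Turn:
--         return (dx == 1 and dy == 1) or (-size < dx <= 0 and abs(dy) == -dx)
--     return False
-- ===== Notes on version B (the rewrite author's own statement) =====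
-- stated objective: faster
-- what changed: Replaced A's O(size^2) nested loops that enumerate every diagonal candidate move into a list and then test membership with a direct O(1) arithmetic test (|dy| equals |dx| with the player's direction/range constraints, plus the one special move).
import Mathlib
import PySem

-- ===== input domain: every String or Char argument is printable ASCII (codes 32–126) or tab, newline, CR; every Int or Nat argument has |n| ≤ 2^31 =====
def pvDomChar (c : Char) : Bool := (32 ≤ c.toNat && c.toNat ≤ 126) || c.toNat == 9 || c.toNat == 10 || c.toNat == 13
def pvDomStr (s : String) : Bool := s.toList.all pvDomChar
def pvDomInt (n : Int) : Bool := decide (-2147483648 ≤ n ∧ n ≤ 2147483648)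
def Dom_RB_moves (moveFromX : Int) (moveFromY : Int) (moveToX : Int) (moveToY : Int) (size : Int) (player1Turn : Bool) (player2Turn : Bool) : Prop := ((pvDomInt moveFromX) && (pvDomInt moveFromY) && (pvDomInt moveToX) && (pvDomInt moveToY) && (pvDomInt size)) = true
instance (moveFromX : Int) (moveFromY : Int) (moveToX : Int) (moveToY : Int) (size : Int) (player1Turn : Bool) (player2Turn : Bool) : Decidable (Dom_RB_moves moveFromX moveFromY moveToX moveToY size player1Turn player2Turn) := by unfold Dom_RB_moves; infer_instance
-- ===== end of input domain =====

-- B replaces A's O(size^2) candidate-list enumeration by a direct O(1) arithmetic test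
-- (|dy| = |dx| with per-player sign and range constraints, plus the one special move).

-- ===== PORT A =====
-- literal transliteration: build possibleMoves by the same nested range loops, then test membership
def RB_moves (moveFromX : Int) (moveFromY : Int) (moveToX : Int) (moveToY : Int) (size : Int) (player1Turn : Bool) (player2Turn : Bool) : Bool :=
  let moveDif : Int × Int := (moveToX - moveFromX, moveToY - moveFromY)
  let possibleMoves : List (Int × Int) :=
    if player2Turn then [(-1, 1)]
    else if player1Turn then [(1, 1)]
    else []
  let possibleMoves :=
    (PySem.List.pyRange 0 size 1).foldl (fun acc x =>
      (PySem.List.pyRange 0 size 1).foldl (fun acc2 y =>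
        if x == y then
          if player2Turn then acc2 ++ [(x, -y), (x, y)]
          else if player1Turn then acc2 ++ [(-x, -y), (-x, y)]
          else acc2
        else acc2) acc) possibleMoves
  if possibleMoves.contains moveDif then true else false

-- ===== PORT B =====
def RB_moves_alt (moveFromX : Int) (moveFromY : Int) (moveToX : Int) (moveToY : Int) (size : Int) (player1Turn : Bool) (player2Turn : Bool) : Bool :=
  let dx := moveToX - moveFromX
  let dy := moveToY - moveFromY
  if player2Turn then
    (dx == -1 && dy == 1) || (decide (0 ≤ dx) && decide (dx < size) && (dy.natAbs == dx))
  else if player1Turn then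
    (dx == 1 && dy == 1) || (decide (-size < dx) && decide (dx ≤ 0) && ((dy.natAbs : Int) == -dx))
  else
    false

-- ===== PRECONDITION & SPEC =====
def Spec_RB_moves (moveFromX : Int) (moveFromY : Int) (moveToX : Int) (moveToY : Int) (size : Int) (player1Turn : Bool) (player2Turn : Bool) (out : Bool) : Prop := out = RB_moves_alt moveFromX moveFromY moveToX moveToY size player1Turn player2Turn
instance (moveFromX : Int) (moveFromY : Int) (moveToX : Int) (moveToY : Int) (size : Int) (player1Turn : Bool) (player2Turn : Bool) (out : Bool) : Decidable (Spec_RB_moves moveFromX moveFromY moveToX moveToY size player1Turn player2Turn out) := by unfold Spec_RB_moves; infer_instance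

-- ===== CLAIM (what is proved, stated in full; the proofs are below) =====
def Claim_equal_RB_moves : Prop := ∀ (moveFromX : Int) (moveFromY : Int) (moveToX : Int) (moveToY : Int) (size : Int) (player1Turn : Bool) (player2Turn : Bool), Dom_RB_moves moveFromX moveFromY moveToX moveToY size player1Turn player2Turn → Spec_RB_moves moveFromX moveFromY moveToX moveToY size player1Turn player2Turn (RB_moves moveFromX moveFromY moveToX moveToY size player1Turn player2Turn)

-- ===== LEMMAS AND PROOFS =====

-- 'out += g(x)' loop: fold of appends is acc ++ flatMap
theorem pvFoldl_append {α β : Type} (L : List β) (g : β → List α) (acc : List α) :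
    L.foldl (fun a y => a ++ g y) acc = acc ++ L.flatMap g := by
  induction L generalizing acc with
  | nil => simp
  | cons h t ih => simp [ih]

-- the guarded-append loop body is an unconditional append of a guarded list
theorem pvFoldl_guard_append {α β : Type} [DecidableEq β] (L : List β) (p : β → Prop) [DecidablePred p] (E : β → List α) (acc : List α) :
    L.foldl (fun a y => if p y then a ++ E y else a) acc
      = acc ++ L.flatMap (fun y => if p y then E y else []) := by
  induction L generalizing acc with
  | nil => simp
  | cons h t ih => by_cases hp : p h <;> simp [hp, ih]

theorem pvMem_A_iff (moveFromX moveFromY moveToX moveToY size : Int) (player1Turn player2Turn : Bool) :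
    RB_moves moveFromX moveFromY moveToX moveToY size player1Turn player2Turn = true ↔
    (let dx := moveToX - moveFromX
     let dy := moveToY - moveFromY
     (if player2Turn then (dx = -1 ∧ dy = 1) ∨ ∃ x, (0 ≤ x ∧ x < size) ∧ (dx = x ∧ dy = -x ∨ dx = x ∧ dy = x)
      else if player1Turn then (dx = 1 ∧ dy = 1) ∨ ∃ x, (0 ≤ x ∧ x < size) ∧ (dx = -x ∧ dy = -x ∨ dx = -x ∧ dy = x)
      else False)) := by
  unfold RB_moves
  have hinner : ∀ (x : Int) (acc : List (Int × Int)),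
      (PySem.List.pyRange 0 size 1).foldl (fun acc2 y =>
        if x == y then
          if player2Turn then acc2 ++ [(x, -y), (x, y)]
          else if player1Turn then acc2 ++ [(-x, -y), (-x, y)]
          else acc2
        else acc2) acc
      = acc ++ (PySem.List.pyRange 0 size 1).flatMap (fun y =>
          if x = y then
            (if player2Turn then [(x, -y), (x, y)]
             else if player1Turn then [(-x, -y), (-x, y)]
             else [])
          else []) := by
    intro x acc
    rw [show (fun (acc2 : List (Int × Int)) y =>
          if x == y then
            if player2Turn then acc2 ++ [(x, -y), (x, y)]
            else if player1Turn then acc2 ++ [(-x, -y), (-x, y)]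
            else acc2
          else acc2)
        = (fun acc2 y =>
          if x = y then
            acc2 ++ (if player2Turn then [(x, -y), (x, y)]
                     else if player1Turn then [(-x, -y), (-x, y)]
                     else [])
          else acc2) from by
      funext a y
      by_cases h : x = y <;> simp [h] <;> cases player2Turn <;> cases player1Turn <;> simp]
    exact pvFoldl_guard_append _ _ _ acc
  simp only [hinner]
  rw [pvFoldl_append (PySem.List.pyRange 0 size 1) _ _]
  simp only [List.contains_eq_mem, List.mem_append, List.mem_flatMap, PySem.List.mem_pyRange_one]
  cases player2Turn <;> cases player1Turn <;>
    simp [Prod.ext_iff] <;>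
    constructor <;>
    · rintro (h | ⟨x, hx, h⟩)
      · exact Or.inl h
      · refine Or.inr ⟨x, hx, ?_⟩
        rcases h with ⟨y, hy, hxy, h⟩ | ⟨y, hy, hxy, h⟩
        · subst hxy; tauto
        · subst hxy; tauto

-- ===== VERDICT (by name: the statement is the Claim_ definition above) =====
theorem RB_moves_spec : Claim_equal_RB_moves := by
  intro moveFromX moveFromY moveToX moveToY size player1Turn player2Turn _
  unfold Spec_RB_moves
  rw [Bool.eq_iff_iff, pvMem_A_iff]
  unfold RB_moves_alt
  cases player2Turn <;> cases player1Turn <;> simp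
  all_goals
    constructor
    · rintro (h | ⟨x, hx, h⟩)
      · exact Or.inl h
      · exact Or.inr (by rcases abs_cases (moveToY - moveFromY) with ⟨habs, hsg⟩ | ⟨habs, hsg⟩ <;> omega)
    · rintro (h | h)
      · exact Or.inl h
      · first
        | (refine Or.inr ⟨moveToX - moveFromX, ?_⟩
           rcases abs_cases (moveToY - moveFromY) with ⟨habs, hsg⟩ | ⟨habs, hsg⟩ <;> omega)
        | (refine Or.inr ⟨moveFromX - moveToX, ?_⟩
           rcases abs_cases (moveToY - moveFromY) with ⟨habs, hsg⟩ | ⟨habs, hsg⟩ <;> omega)
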